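-- pv_equiv track=rewrite | github.com/alncat/opusTomo | analysis_scripts/convert_pytom.py | _sanitize_pytom_loop_header_spacing
-- ===== SOURCE A (Python) =====
-- def _sanitize_pytom_loop_header_spacing(text: str) -> str:
--     """Remove blank lines between `loop_` and first `_rln...` header."""
--     lines = text.splitlines(keepends=True)
--     out = []
--     i = 0
--     while i < len(lines):
--         line = lines[i]
--         out.append(line)
--         if line.strip() != "loop_":
--             i += 1
--             continue
--
--         j = i + 1
--         blank_lines = []
--         while j < len(lines) and lines[j].strip() == "":
--             blank_lines.append(lines[j])
--             j += 1
--
--         # PyTOM export sometimes inserts an empty line here: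
--         # loop_
--         #
--         # _rlnXXX ...
--         if j < len(lines) and lines[j].lstrip().startswith("_rln"):
--             # Drop the blank lines in this specific case.
--             i = j
--             continue
--
--         # Otherwise keep original content.
--         out.extend(blank_lines)
--         i = j
--
--     return "".join(out)
-- ===== SOURCE B (Python) =====
-- def _sanitize_pytom_loop_header_spacing(text: str) -> str:
--     """Remove blank lines between `loop_` and first `_rln...` header."""
--     out = []
--     pending = []
--     after_loop = False
--     for line in text.splitlines(keepends=True):
--         if after_loop and line.strip() == "":
--             pending.append(line)
--             continue
--         if not (after_loop and line.lstrip().startswith("_rln")):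
--             out.extend(pending)
--         out.append(line)
--         pending = []
--         after_loop = line.strip() == "loop_"
--     out.extend(pending)
--     return "".join(out)
-- ===== Notes on version B (the rewrite author's own statement) =====
-- stated objective: simpler
-- what changed: Replaces A's index-based while loop with a nested blank-lookahead scan after each loop_ line by a single forward pass keeping an after_loop flag and a pending buffer of blank lines that is flushed or dropped at the next decision line.
import Mathlib
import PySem

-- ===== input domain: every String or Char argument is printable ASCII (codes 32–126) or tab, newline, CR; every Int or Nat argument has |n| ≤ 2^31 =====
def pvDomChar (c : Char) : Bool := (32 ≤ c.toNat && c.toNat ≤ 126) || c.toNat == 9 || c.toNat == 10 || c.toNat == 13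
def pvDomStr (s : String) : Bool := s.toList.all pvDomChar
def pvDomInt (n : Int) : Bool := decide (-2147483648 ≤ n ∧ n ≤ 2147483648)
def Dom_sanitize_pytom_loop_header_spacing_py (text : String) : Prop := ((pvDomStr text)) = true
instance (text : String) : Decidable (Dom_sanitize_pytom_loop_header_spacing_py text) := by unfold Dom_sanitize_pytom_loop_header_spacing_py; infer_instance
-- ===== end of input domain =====

-- B replaces A's index loop with an inner blank-lookahead scan by ONE forward pass
-- keeping an `after_loop` flag and a `pending` buffer of blank lines (objective: simpler).

-- shared helper: Python's str.splitlines(keepends=True), exact on the Dom alphabet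
-- (the only line breaks occurring in Dom are '\n', '\r' and '\r\n').
def pvSplitKeep : List Char → List Char → List (List Char)
  | [], acc => if acc = [] then [] else [acc.reverse]
  | '\r' :: '\n' :: rest, acc => (acc.reverse ++ ['\r', '\n']) :: pvSplitKeep rest []
  | '\r' :: rest, acc => (acc.reverse ++ ['\r']) :: pvSplitKeep rest []
  | '\n' :: rest, acc => (acc.reverse ++ ['\n']) :: pvSplitKeep rest []
  | c :: rest, acc => pvSplitKeep rest (c :: acc)
termination_by cs _ => cs.length

-- ===== PORT A =====
-- A's while loop over indices i (outer) and j (inner blank scan): the outer advance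
-- `i = j` becomes recursion on the remaining line list; the inner while collecting
-- `blank_lines` up to j is the takeWhile/dropWhile split of the remainder.
def pvALoop : List (List Char) → List (List Char)
  | [] => []
  | line :: rest =>
    if PySem.Chars.strip line ≠ "loop_".toList then
      line :: pvALoop rest
    else
      let blanks := rest.takeWhile (fun l => PySem.Chars.strip l == [])
      let rest' := rest.dropWhile (fun l => PySem.Chars.strip l == [])
      match rest' with
      | [] => line :: blanks
      | next :: _ =>
        if PySem.Chars.startswith (PySem.Chars.lstrip next) "_rln".toList then
          line :: pvALoop rest'
        else
          line :: (blanks ++ pvALoop rest')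
termination_by ls => ls.length
decreasing_by
  all_goals
    simp only [List.length_cons]
    have h := List.length_dropWhile_le (fun l => PySem.Chars.strip l == []) rest
    omega

def sanitize_pytom_loop_header_spacing_py (text : String) : String :=
  String.ofList (pvALoop (pvSplitKeep text.toList [])).flatten

-- ===== PORT B =====
-- Source B's loop body, as the step of a fold over (out, pending, after_loop)
def pvBStep (st : List (List Char) × List (List Char) × Bool) (line : List Char) :
    List (List Char) × List (List Char) × Bool :=
  if st.2.2 && (PySem.Chars.strip line == []) then
    (st.1, st.2.1 ++ [line], st.2.2)
  else
    let out := if st.2.2 && PySem.Chars.startswith (PySem.Chars.lstrip line) "_rln".toList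
               then st.1 else st.1 ++ st.2.1
    (out ++ [line], [], PySem.Chars.strip line == "loop_".toList)

def sanitize_pytom_loop_header_spacing_py_alt (text : String) : String :=
  let fin := (pvSplitKeep text.toList []).foldl pvBStep ([], [], false)
  String.ofList (fin.1 ++ fin.2.1).flatten

-- ===== PRECONDITION & SPEC =====
def Spec_sanitize_pytom_loop_header_spacing_py (text : String) (out : String) : Prop := out = sanitize_pytom_loop_header_spacing_py_alt text
instance (text : String) (out : String) : Decidable (Spec_sanitize_pytom_loop_header_spacing_py text out) := by unfold Spec_sanitize_pytom_loop_header_spacing_py; infer_instance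

-- ===== CLAIM (what is proved, stated in full; the proofs are below) =====
def Claim_equal_sanitize_pytom_loop_header_spacing_py : Prop := ∀ (text : String), Dom_sanitize_pytom_loop_header_spacing_py text → Spec_sanitize_pytom_loop_header_spacing_py text (sanitize_pytom_loop_header_spacing_py text)

-- ===== LEMMAS AND PROOFS =====

-- the lines B's fold emits, as a structural recursion over (pending, after_loop, lines)
def pvG : List (List Char) → Bool → List (List Char) → List (List Char)
  | p, _, [] => p
  | p, a, l :: t =>
    if a && (PySem.Chars.strip l == []) then pvG (p ++ [l]) a t
    else (if a && PySem.Chars.startswith (PySem.Chars.lstrip l) "_rln".toList then [] else p)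
         ++ l :: pvG [] (PySem.Chars.strip l == "loop_".toList) t

theorem pvFold_eq_pvG (ls : List (List Char)) : ∀ (out p : List (List Char)) (a : Bool),
    (ls.foldl pvBStep (out, p, a)).1 ++ (ls.foldl pvBStep (out, p, a)).2.1
      = out ++ pvG p a ls := by
  induction ls with
  | nil => intro out p a; simp [pvG]
  | cons l t ih =>
    intro out p a
    simp only [List.foldl_cons, pvBStep, pvG]
    by_cases h : (a && (PySem.Chars.strip l == [])) = true
    · simp only [h, if_true, ih]
    · simp only [Bool.not_eq_true] at h
      simp only [h, Bool.false_eq_true, if_false, ih]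
      split <;> simp

-- A's lookahead after a `loop_` line, with pending blanks p already buffered
def pvLook (p : List (List Char)) (ls : List (List Char)) : List (List Char) :=
  match ls.dropWhile (fun l => PySem.Chars.strip l == []) with
  | [] => p ++ ls.takeWhile (fun l => PySem.Chars.strip l == [])
  | next :: _ =>
    (if PySem.Chars.startswith (PySem.Chars.lstrip next) "_rln".toList
     then [] else p ++ ls.takeWhile (fun l => PySem.Chars.strip l == []))
      ++ pvALoop (ls.dropWhile (fun l => PySem.Chars.strip l == []))

theorem pvALoop_loop_case (line : List Char) (t : List (List Char))
    (h : PySem.Chars.strip line = "loop_".toList) :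
    pvALoop (line :: t) = line :: pvLook [] t := by
  rw [pvALoop]
  simp only [h, ne_eq, not_true_eq_false, if_false, pvLook]
  cases hd : t.dropWhile (fun l => PySem.Chars.strip l == []) with
  | nil => simp
  | cons next rest =>
    split
    · simp
    · rename_i n2 t2 heq
      injection heq with h1 h2
      subst h1; subst h2
      split <;> simp

theorem pvG_eq_pvALoop : ∀ (n : ℕ) (ls : List (List Char)), ls.length ≤ n →
    (pvG [] false ls = pvALoop ls) ∧ (∀ p, pvG p true ls = pvLook p ls) := by
  intro n
  induction n with
  | zero =>
    intro ls hl
    have : ls = [] := List.eq_nil_of_length_eq_zero (Nat.le_zero.mp hl)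
    subst this
    exact ⟨by simp [pvG, pvALoop], fun p => by simp [pvG, pvLook, List.dropWhile, List.takeWhile]⟩
  | succ n ih =>
    intro ls hl
    cases ls with
    | nil => exact ⟨by simp [pvG, pvALoop], fun p => by simp [pvG, pvLook, List.dropWhile, List.takeWhile]⟩
    | cons l t =>
      have ht : t.length ≤ n := by simpa using Nat.succ_le_succ_iff.mp hl
      have iht := ih t ht
      -- key: processing a decision line l and continuing with the fresh flag is A's step
      have key : l :: pvG [] (PySem.Chars.strip l == "loop_".toList) t = pvALoop (l :: t) := by
        by_cases hloop : PySem.Chars.strip l = "loop_".toList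
        · rw [pvALoop_loop_case l t hloop]
          simp only [hloop, beq_self_eq_true]
          exact congrArg _ (iht.2 [])
        · have hb : (PySem.Chars.strip l == "loop_".toList) = false := by
            simpa using hloop
          rw [pvALoop, if_pos hloop]
          simp only [hb]
          exact congrArg _ iht.1
      constructor
      · simp only [pvG, Bool.false_and, Bool.false_eq_true, if_false, List.nil_append]
        exact key
      · intro p
        by_cases hblank : (PySem.Chars.strip l == []) = true
        · -- blank line: buffered into pending on both sides
          simp only [pvG, Bool.true_and, hblank, if_true]
          rw [iht.2 (p ++ [l])]
          simp only [pvLook, List.dropWhile, List.takeWhile, hblank, List.append_assoc,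
            List.cons_append, List.nil_append]
        · -- decision line
          simp only [Bool.not_eq_true] at hblank
          simp only [pvG, Bool.true_and, hblank, Bool.false_eq_true, if_false]
          rw [key]
          simp only [pvLook, List.dropWhile, List.takeWhile, hblank, List.append_nil]

theorem pvA_eq_pvB (ls : List (List Char)) : pvALoop ls = pvG [] false ls :=
  (pvG_eq_pvALoop ls.length ls le_rfl).1.symm

-- ===== VERDICT (by name: the statement is the Claim_ definition above) =====
theorem sanitize_pytom_loop_header_spacing_py_spec : Claim_equal_sanitize_pytom_loop_header_spacing_py := by
  intro text _
  unfold Spec_sanitize_pytom_loop_header_spacing_py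
  simp only [sanitize_pytom_loop_header_spacing_py, sanitize_pytom_loop_header_spacing_py_alt]
  rw [pvFold_eq_pvG, pvA_eq_pvB]
  simp
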